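-- pv_equiv track=rewrite | github.com/YunTang1997/My_projects | 编程题/投票计数(华为).py | mingri
-- ===== SOURCE A (Python) =====
-- from collections import Counter  #　计数
--
-- def mingri(name_list):
--     # input_ = count(name_list)
--     input_ = Counter(name_list)  # 元素以字典key的形式存储，并将其计数存储为字典value
--
--     input_keys = sorted(input_.keys())
--     input_sort1 = []
--     for i in input_keys:
--         input_sort1.append([i, input_[i]])
--     input_sort1 = dict(input_sort1)
--
--     input_values = input_.values()
--     result = []
--     for key, elem in zip(input_sort1.keys(), input_sort1.values()):
--         if elem == max(input_values):
--             result.append(key)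
--
--     result = sorted(result)
--
--     return result[0]
-- ===== SOURCE B (Python) =====
-- def mingri(name_list):
--     counts = {}
--     for n in name_list:
--         counts[n] = counts.get(n, 0) + 1
--     best_name, best_count = None, -1
--     for name in sorted(counts):
--         c = counts[name]
--         if c > best_count:
--             best_name, best_count = name, c
--     return best_name
-- ===== Notes on version B (the rewrite author's own statement) =====
-- stated objective: faster
-- what changed: A recomputes max(values) inside its loop over the keys, filters max-count keys into a list and sorts it a second time; B does a single best-so-far scan over the sorted distinct names keeping the first name whose count exceeds the running best, with no per-key max() recomputation, no filter and no re-sort.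
import Mathlib
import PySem

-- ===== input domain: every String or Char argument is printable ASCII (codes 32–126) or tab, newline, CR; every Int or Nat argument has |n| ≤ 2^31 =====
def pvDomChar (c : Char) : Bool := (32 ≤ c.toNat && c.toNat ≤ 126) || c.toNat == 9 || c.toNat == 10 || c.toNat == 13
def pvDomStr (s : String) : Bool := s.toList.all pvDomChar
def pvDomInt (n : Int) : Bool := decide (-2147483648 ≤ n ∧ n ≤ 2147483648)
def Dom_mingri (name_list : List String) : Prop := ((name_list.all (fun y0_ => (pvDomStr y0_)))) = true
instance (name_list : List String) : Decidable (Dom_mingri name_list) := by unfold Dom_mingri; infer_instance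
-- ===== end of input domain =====

-- B replaces A's max/filter/re-sort phases by a single best-so-far scan over the sorted distinct names (objective: simpler).

-- ===== PORT A =====
def mingri (name_list : List String) : String :=
  let input_ : PySem.Dict String Int := PySem.Dict.counter name_list
  let input_keys := PySem.List.sorted input_.keys (fun x => x)
  let input_sort1_list : List (String × Int) :=
    input_keys.foldl (fun acc i => acc ++ [(i, input_.getD i 0)]) []
  let input_sort1 := PySem.Dict.ofList input_sort1_list
  let input_values := input_.values
  let result : List String :=
    (List.zip input_sort1.keys input_sort1.values).foldl
      (fun res ke =>
        if (PySem.List.max? input_values (fun y => y)) == some ke.2 then res ++ [ke.1] else res) []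
  let result := PySem.List.sorted result (fun x => x)
  (PySem.List.pyGet? result 0).getD ""   -- result[0]; Pre_ excludes the empty input where Python raises IndexError

-- ===== PORT B =====
def mingri_alt (name_list : List String) : String :=
  let counts : PySem.Dict String Int :=
    name_list.foldl (fun d n => d.insert n (d.getD n 0 + 1)) PySem.Dict.empty
  let best :=
    (PySem.List.sorted counts.keys (fun x => x)).foldl
      (fun (b : Option String × Int) name =>
        if counts.getD name 0 > b.2 then (some name, counts.getD name 0) else b)
      (none, -1)
  best.1.getD ""   -- best_name; Pre_ excludes the empty input where Python B returns None (not a str)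

-- ===== PRECONDITION & SPEC =====
-- Pre_ excludes only the empty list: there A raises IndexError (result[0] of an empty list) and B returns None.
def Pre_mingri (name_list : List String) : Prop := name_list ≠ []
instance (name_list : List String) : Decidable (Pre_mingri name_list) := by unfold Pre_mingri; infer_instance
def pvWitness_mingri : List String := (["bob", "amy", "bob"])
def Spec_mingri (name_list : List String) (out : String) : Prop := out = mingri_alt name_list
instance (name_list : List String) (out : String) : Decidable (Spec_mingri name_list out) := by unfold Spec_mingri; infer_instance

-- ===== CLAIM (what is proved, stated in full; the proofs are below) =====
def Claim_equal_mingri : Prop := ∀ (name_list : List String), Dom_mingri name_list → Pre_mingri name_list → Spec_mingri name_list (mingri name_list)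

-- ===== LEMMAS AND PROOFS =====

-- zip of the projections of a pair list is the list itself
lemma zip_fst_snd {α β : Type} (l : List (α × β)) :
    List.zip (l.map Prod.fst) (l.map Prod.snd) = l := by
  induction l with
  | nil => rfl
  | cons a t _ => simp [List.zip]

-- the best-so-far fold of B, characterised: it returns the running max together with the
-- FIRST element attaining it (or the start state if nothing beats it)
lemma fold_best (f : String → Int) (L : List String) (bn : Option String) (bc : Int) :
    L.foldl (fun (b : Option String × Int) name =>
        if f name > b.2 then (some name, f name) else b) (bn, bc)
    = (let M := L.foldl (fun acc k => max acc (f k)) bc;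
       if bc < M then (L.find? (fun k => f k == M), M) else (bn, bc)) := by
  induction L generalizing bn bc with
  | nil => simp
  | cons a t ih =>
    have hM := (PySem.List.le_foldl_max ((a :: t).map f) bc).1
    simp only [List.foldl_cons]
    by_cases h : f a > bc
    · rw [if_pos h, ih]
      have hmax : max bc (f a) = f a := max_eq_right (le_of_lt h)
      have hMa := (PySem.List.le_foldl_max (t.map f) (f a)).1
      rw [List.foldl_map] at hMa
      simp only [hmax]
      by_cases h2 : f a < t.foldl (fun acc k => max acc (f k)) (f a)
      · rw [if_pos h2, if_pos (lt_trans h h2)]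
        have : (f a == t.foldl (fun acc k => max acc (f k)) (f a)) = false := by
          simp [ne_of_lt h2]
        simp [List.find?, this]
      · have heq : t.foldl (fun acc k => max acc (f k)) (f a) = f a := le_antisymm (not_lt.1 h2) hMa
        rw [if_neg h2, heq, if_pos h]
        simp [List.find?]
    · rw [if_neg h, ih]
      have hmax : max bc (f a) = bc := max_eq_left (not_lt.1 h)
      simp only [hmax]
      by_cases h2 : bc < t.foldl (fun acc k => max acc (f k)) bc
      · rw [if_pos h2, if_pos h2]
        have : (f a == t.foldl (fun acc k => max acc (f k)) bc) = false := by
          simp; exact ne_of_lt (lt_of_le_of_lt (not_lt.1 h) h2)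
        simp [List.find?, this]
      · rw [if_neg h2, if_neg h2]

-- every value stored by Counter is a positive count
lemma counter_value_pos (xs : List String) (v : Int)
    (hv : v ∈ (PySem.Dict.counter xs).values) : 1 ≤ v := by
  rw [PySem.Dict.values_eq_map_keys _ (PySem.Dict.nodup_keys_counter xs) 0] at hv
  rcases List.mem_map.1 hv with ⟨k, hk, rfl⟩
  rw [PySem.Dict.getD_counter]
  rw [PySem.Dict.keys_counter, PySem.Set.mem_ofList] at hk
  exact_mod_cast List.count_pos_iff.2 hk

-- ===== VERDICT (by name: the statement is the Claim_ definition above) =====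
theorem mingri_spec : Claim_equal_mingri := by
  intro name_list _ hpre
  unfold Spec_mingri mingri mingri_alt
  simp only []
  -- shared objects
  set d := PySem.Dict.counter name_list with hd
  have hkeys : d.keys = PySem.Set.ofList name_list := PySem.Dict.keys_counter name_list
  have hknd : d.keys.Nodup := PySem.Dict.nodup_keys_counter name_list
  set f : String → Int := fun k => d.getD k 0 with hf
  set S := PySem.List.sorted d.keys (fun x => x) with hS
  have hSperm : S.Perm d.keys := PySem.List.sorted_perm _ _ _
  have hSnd : S.Nodup := hSperm.nodup_iff.2 hknd
  have hSlt : S.Pairwise (· < ·) := by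
    rw [hS, hkeys]; exact PySem.List.sorted_ofList_pairwise_lt name_list
  -- B's counter is the same dict
  have hcnt : name_list.foldl (fun d n => d.insert n (d.getD n 0 + 1)) PySem.Dict.empty = d :=
    PySem.Dict.foldl_insert_getD_add_one_eq_counter name_list
  rw [hcnt]
  -- A: the pair list over sorted keys
  rw [PySem.List.foldl_append_singleton_eq_map (fun i => (i, d.getD i 0)) S []]
  simp only [List.nil_append]
  -- dict() of that list: ofList is a fold of inserts over fresh distinct keys
  have hofList : (PySem.Dict.ofList (S.map (fun i => (i, d.getD i 0)))).items
      = S.map (fun i => (i, d.getD i 0)) := by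
    have : PySem.Dict.ofList (S.map (fun i => (i, d.getD i 0)))
        = (S.map (fun i => (i, d.getD i 0))).foldl (fun d p => d.insert p.1 p.2) PySem.Dict.empty := by
      simp [PySem.Dict.ofList, PySem.Dict.update]
    rw [this, PySem.Dict.items_foldl_insert_fresh _ (fun p : String × Int => p.1) (fun p : String × Int => p.2)]
    · have h0 : (PySem.Dict.empty : PySem.Dict String Int).items = [] := rfl
      rw [h0, List.nil_append]; simp
    · intro a _; exact PySem.Dict.contains_empty _
    · have hid : List.map ((fun p : String × Int => p.1) ∘ fun i => (i, d.getD i 0)) S = S := by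
        simp [Function.comp_def]
      rw [List.map_map, hid]; exact hSnd
  have hkeys1 : (PySem.Dict.ofList (S.map (fun i => (i, d.getD i 0)))).keys
      = (S.map (fun i => (i, d.getD i 0))).map Prod.fst := by
    simp [PySem.Dict.keys, hofList]
  have hvals1 : (PySem.Dict.ofList (S.map (fun i => (i, d.getD i 0)))).values
      = (S.map (fun i => (i, d.getD i 0))).map Prod.snd := by
    simp [PySem.Dict.values, hofList]
  rw [hkeys1, hvals1, zip_fst_snd]
  -- A's filtering loop
  rw [PySem.List.foldl_append_if _ Prod.fst _ []]
  simp only [List.nil_append]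
  -- the max of the counter's values
  have hVne : d.values ≠ [] := by
    have hmem : name_list.head hpre ∈ d.keys := by
      rw [hkeys, PySem.Set.mem_ofList]; exact List.head_mem hpre
    have : d.getD (name_list.head hpre) 0 ∈ d.values := by
      rw [PySem.Dict.values_eq_map_keys _ hknd 0]
      exact List.mem_map.2 ⟨_, hmem, rfl⟩
    intro h; rw [h] at this; exact absurd this (List.not_mem_nil)
  obtain ⟨v0, vt, hV⟩ := List.exists_cons_of_ne_nil hVne
  have hv0pos : (1 : Int) ≤ v0 := counter_value_pos name_list v0 (by rw [hV]; exact List.mem_cons_self)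
  set M := vt.foldl max v0 with hM
  have hmaxV : PySem.List.max? d.values (fun y => y) = some M := by
    rw [hV]; exact PySem.List.max?_id_cons v0 vt
  have hv0M : v0 ≤ M := (PySem.List.le_foldl_max vt v0).1
  -- B's running max over S equals M
  have hMb : S.foldl (fun acc k => max acc (f k)) (-1) = M := by
    have h1 : S.foldl (fun acc k => max acc (f k)) (-1) = (S.map f).foldl max (-1) :=
      (List.foldl_map).symm
    have hperm : (S.map f).Perm d.values := by
      rw [PySem.Dict.values_eq_map_keys _ hknd 0]
      exact hSperm.map f
    have h2 : (S.map f).foldl max (-1) = d.values.foldl max (-1) :=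
      hperm.foldl_eq (-1)
    rw [h1, h2, hV, List.foldl_cons, max_eq_right (by omega : (-1 : Int) ≤ v0)]
  -- rewrite B via fold_best
  rw [fold_best f S none (-1), hMb]
  rw [if_pos (by omega : (-1 : Int) < M)]
  -- A: drop the pairing and align the filter predicate with B's
  have hcomp : (List.map Prod.fst (List.filter
        (fun ke => ((PySem.List.max? d.values (fun y => y) == some ke.2) : Bool))
        (S.map (fun i => (i, d.getD i 0)))))
      = S.filter (fun k => f k == M) := by
    rw [List.filter_map, List.map_map]
    have h1 : (Prod.fst ∘ fun i => (i, d.getD i 0)) = id := rfl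
    rw [h1, List.map_id]
    apply List.filter_congr
    intro k _
    simp [hf, hmaxV, Function.comp, eq_comm]
  rw [hcomp]
  -- the filtered list is already strictly sorted, so the second sort is the identity
  rw [PySem.List.sorted_eq_of_perm_of_pairwise_lt _ _ _ (List.Perm.refl _) (hSlt.filter _)]
  rw [PySem.List.pyGet?_zero, ← List.head?_eq_getElem?, List.head?_filter]
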